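-- pv_equiv track=rewrite | github.com/TGITS/programming-workouts | python/kata/chessboard_puzzles/bishop_on_a_chessboard/bishop.py | create_and_initialize_chessboard
-- ===== SOURCE A (Python) =====
-- def create_and_initialize_chessboard(n, r, c):
--     chessboard = []
--     for i in range(1,n+1):
--         row = []
--         for j in range(1,n+1):
--             if (i+j == r+c) or (i-j == r -c):
--                 row.append(1)
--             else:
--                 row.append(0)
--         chessboard.append(row)
--     return chessboard
-- ===== SOURCE B (Python) =====
-- def create_and_initialize_chessboard(n, r, c):
--     board = []
--     for i in range(1, n + 1):
--         row = [0] * n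
--         col1 = (r + c) - i      # anti-diagonal: i + j == r + c
--         col2 = i - (r - c)      # main diagonal: i - j == r - c
--         if 1 <= col1 <= n:
--             row[col1 - 1] = 1
--         if 1 <= col2 <= n:
--             row[col2 - 1] = 1
--         board.append(row)
--     return board
-- ===== Notes on version B (the rewrite author's own statement) =====
-- stated objective: faster
-- what changed: Instead of testing each of the n*n cells against both diagonal equations, B allocates each zero row once and directly writes the at most two marked cells per row via the column formulas col1=(r+c)-i and col2=i-(r-c), range-checked.
import Mathlib
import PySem

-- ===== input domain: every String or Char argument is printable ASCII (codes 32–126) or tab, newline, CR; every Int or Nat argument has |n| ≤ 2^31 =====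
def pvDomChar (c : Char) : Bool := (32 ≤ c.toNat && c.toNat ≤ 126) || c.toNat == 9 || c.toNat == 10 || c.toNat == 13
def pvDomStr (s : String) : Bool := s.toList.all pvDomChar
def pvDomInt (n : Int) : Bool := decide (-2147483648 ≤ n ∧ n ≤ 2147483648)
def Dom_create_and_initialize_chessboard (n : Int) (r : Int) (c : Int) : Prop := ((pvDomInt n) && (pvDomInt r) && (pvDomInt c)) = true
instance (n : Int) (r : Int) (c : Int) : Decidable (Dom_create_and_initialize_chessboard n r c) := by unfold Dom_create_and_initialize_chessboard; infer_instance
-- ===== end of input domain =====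

-- B places each row's at-most-two diagonal marks directly (O(1) marking work per row) instead of testing every cell.

-- ===== PORT A =====
def create_and_initialize_chessboard (n : Int) (r : Int) (c : Int) : List (List Int) :=
  (PySem.List.pyRange 1 (n + 1) 1).foldl (fun chessboard i =>
    chessboard ++ [(PySem.List.pyRange 1 (n + 1) 1).foldl (fun row j =>
      row ++ [if i + j = r + c ∨ i - j = r - c then (1 : Int) else 0]) []]) []

-- ===== PORT B =====
-- one row of B: zeros with the (range-checked) two diagonal columns set to 1
def pvAltRow (n r c i : Int) : List Int :=
  let row0 := List.replicate n.toNat (0 : Int)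
  let col1 := (r + c) - i
  let row1 := if 1 ≤ col1 ∧ col1 ≤ n then row0.set (col1 - 1).toNat 1 else row0
  let col2 := i - (r - c)
  if 1 ≤ col2 ∧ col2 ≤ n then row1.set (col2 - 1).toNat 1 else row1

def create_and_initialize_chessboard_alt (n : Int) (r : Int) (c : Int) : List (List Int) :=
  (PySem.List.pyRange 1 (n + 1) 1).foldl (fun board i => board ++ [pvAltRow n r c i]) []

-- ===== PRECONDITION & SPEC =====
def Spec_create_and_initialize_chessboard (n : Int) (r : Int) (c : Int) (out : List (List Int)) : Prop := out = create_and_initialize_chessboard_alt n r c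
instance (n : Int) (r : Int) (c : Int) (out : List (List Int)) : Decidable (Spec_create_and_initialize_chessboard n r c out) := by unfold Spec_create_and_initialize_chessboard; infer_instance

-- ===== CLAIM (what is proved, stated in full; the proofs are below) =====
def Claim_equal_create_and_initialize_chessboard : Prop := ∀ (n : Int) (r : Int) (c : Int), Dom_create_and_initialize_chessboard n r c → Spec_create_and_initialize_chessboard n r c (create_and_initialize_chessboard n r c)

-- ===== LEMMAS AND PROOFS =====

-- an append-accumulating foldl is a map
theorem pv_foldl_push {α β : Type} (f : α → β) (l : List α) (acc : List β) :
    l.foldl (fun a x => a ++ [f x]) acc = acc ++ l.map f := by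
  induction l generalizing acc with
  | nil => simp
  | cons h t ih => simp [List.foldl, ih]

theorem pvAltRow_length (n r c i : Int) : (pvAltRow n r c i).length = n.toNat := by
  simp only [pvAltRow]
  split_ifs <;> simp

-- each row of A equals B's directly-placed row
theorem pv_row_eq (n r c i : Int) :
    (List.range n.toNat).map
      (fun (k : Nat) => if i + (1 + (k : Int)) = r + c ∨ i - (1 + (k : Int)) = r - c then (1 : Int) else 0)
      = pvAltRow n r c i := by
  apply List.ext_getElem
  · simp [pvAltRow_length]
  · intro k hk hk'
    have hkn : k < n.toNat := by simpa using hk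
    rw [List.getElem_map, List.getElem_range]
    simp only [pvAltRow]
    split_ifs with h1 h2 h2 <;>
      simp only [List.getElem_set, List.getElem_replicate] <;>
      (try split_ifs) <;> omega

theorem create_and_initialize_chessboard_eq_alt (n r c : Int) :
    create_and_initialize_chessboard n r c = create_and_initialize_chessboard_alt n r c := by
  unfold create_and_initialize_chessboard create_and_initialize_chessboard_alt
  rw [pv_foldl_push, pv_foldl_push]
  congr 1
  apply List.map_congr_left
  intro i hi
  rw [pv_foldl_push, PySem.List.pyRange_one, List.map_map,
      show (n + 1 - 1 : Int) = n from by ring]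
  exact pv_row_eq n r c i

-- ===== VERDICT (by name: the statement is the Claim_ definition above) =====
theorem create_and_initialize_chessboard_spec : Claim_equal_create_and_initialize_chessboard := by
  intro n r c _
  unfold Spec_create_and_initialize_chessboard
  exact create_and_initialize_chessboard_eq_alt n r c
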